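-- pv_equiv track=rewrite | github.com/pdhung3012/InvestigateNLPLDatasets | devItems/spocExtraction/FuncDeclarationDetectionByML.py | getListOfFeatures
-- ===== SOURCE A (Python) =====
-- def getListOfFeatures(arrPseudoCodes,arrLabels,indexOfPseudoCodes):
--     txtCurrentPS=arrPseudoCodes[indexOfPseudoCodes-1]
--     arrCurrentPS=txtCurrentPS.split(' ')
--     score1=len(arrCurrentPS)
--     lstScores=[]
--     lstScores.append(score1)
--     if 'function' in arrCurrentPS:
--         score2=1
--     else:
--         score2=0
--     lstScores.append(score2)
--     if 'nan' in arrCurrentPS: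
--         score3=1
--     else:
--         score3=0
--     lstScores.append(score3)
--     score4=len(txtCurrentPS)
--     lstScores.append(score4)
--     score5=indexOfPseudoCodes
--     lstScores.append(score5)
--     score6=len(arrPseudoCodes)-indexOfPseudoCodes
--     lstScores.append(score6)
--     score7=indexOfPseudoCodes
--
--     indexScore7=indexOfPseudoCodes-1
--     while indexScore7>0:
--         strItem=arrPseudoCodes[indexScore7-1].strip()
--         if strItem.lower().startswith('for') or strItem.lower().startswith('iterate'):
--             break
--         indexScore7=indexScore7-1
--     score7=indexOfPseudoCodes-indexScore7
--     lstScores.append(score7)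
--
--     score8 = indexOfPseudoCodes
--     indexScore8 = indexOfPseudoCodes - 1
--     while indexScore8 > 0:
--         strItem = arrPseudoCodes[indexScore8 - 1].strip()
--         if strItem.lower().startswith('return'):
--             break
--         indexScore8 = indexScore8 - 1
--     score8 = indexOfPseudoCodes= indexScore8
--     lstScores.append(score8)
--
--     if 'return' in arrCurrentPS or  'returns' in arrCurrentPS:
--         score9 = 1
--     else:
--         score9 = 0
--     lstScores.append(score9)
--
--     return lstScores
-- ===== SOURCE B (Python) =====
-- def getListOfFeatures(arrPseudoCodes, arrLabels, indexOfPseudoCodes):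
--     txtCurrentPS = arrPseudoCodes[indexOfPseudoCodes - 1]
--     arrCurrentPS = txtCurrentPS.split(' ')
--     lastFor = -1
--     lastRet = -1
--     for p in range(indexOfPseudoCodes - 1):
--         s = arrPseudoCodes[p].strip().lower()
--         if s.startswith('for') or s.startswith('iterate'):
--             lastFor = p
--         if s.startswith('return'):
--             lastRet = p
--     return [
--         len(arrCurrentPS),
--         1 if 'function' in arrCurrentPS else 0,
--         1 if 'nan' in arrCurrentPS else 0,
--         len(txtCurrentPS),
--         indexOfPseudoCodes,
--         len(arrPseudoCodes) - indexOfPseudoCodes,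
--         indexOfPseudoCodes - (lastFor + 1),
--         lastRet + 1,
--         1 if ('return' in arrCurrentPS or 'returns' in arrCurrentPS) else 0,
--     ]
-- ===== Notes on version B (the rewrite author's own statement) =====
-- stated objective: simpler
-- what changed: The two backward while-loops scanning for the last 'for/iterate' and 'return' line are replaced by a single forward pass over range(indexOfPseudoCodes-1) recording the last match positions, and the nine scores are returned as one list literal.
-- outside the precondition, e.g. on getListOfFeatures(['ab'], [], 0): A returns [1, 0, 0, 2, 0, 1, 1, -1, 0], B returns [1, 0, 0, 2, 0, 1, 0, 0, 0]
import Mathlib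
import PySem

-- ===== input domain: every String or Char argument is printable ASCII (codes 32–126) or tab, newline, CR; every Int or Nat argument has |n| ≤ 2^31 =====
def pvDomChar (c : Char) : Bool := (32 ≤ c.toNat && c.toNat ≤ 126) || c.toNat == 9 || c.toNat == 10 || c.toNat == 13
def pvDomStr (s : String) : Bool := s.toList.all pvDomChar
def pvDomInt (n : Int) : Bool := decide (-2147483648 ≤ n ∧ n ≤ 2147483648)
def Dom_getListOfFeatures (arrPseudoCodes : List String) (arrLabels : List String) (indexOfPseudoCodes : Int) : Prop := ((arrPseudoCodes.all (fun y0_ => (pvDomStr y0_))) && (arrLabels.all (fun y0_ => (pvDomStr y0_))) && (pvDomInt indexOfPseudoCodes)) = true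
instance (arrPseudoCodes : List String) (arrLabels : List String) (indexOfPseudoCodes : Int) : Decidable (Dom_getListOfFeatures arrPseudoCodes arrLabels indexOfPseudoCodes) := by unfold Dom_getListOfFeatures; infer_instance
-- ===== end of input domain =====

-- B replaces A's two backward while-loops by one forward last-match pass and a list literal (objective: simpler).

-- ===== PORT A =====
-- the backward 'while indexScore > 0: … break …' loop of A, for a given line predicate
-- (the Nat fuel only bounds the countdown so the recursion is structural; it never cuts the loop short)
def pvBackFuel (arr : List String) (pred : String → Bool) : Nat → Int → Int
  | 0, i => i
  | Nat.succ m, i =>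
    if i > 0 then
      if pred ((PySem.List.pyGet? arr (i - 1)).getD "") then i
      else pvBackFuel arr pred m (i - 1)
    else i

def pvBack (arr : List String) (pred : String → Bool) (i : Int) : Int :=
  pvBackFuel arr pred i.toNat i

def pvPredFor (s : String) : Bool :=
  let t := PySem.Str.lower (PySem.Str.strip s)
  PySem.Str.startswith t "for" || PySem.Str.startswith t "iterate"

def pvPredRet (s : String) : Bool :=
  PySem.Str.startswith (PySem.Str.lower (PySem.Str.strip s)) "return"

def getListOfFeatures (arrPseudoCodes : List String) (arrLabels : List String) (indexOfPseudoCodes : Int) : List Int :=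
  let txtCurrentPS := (PySem.List.pyGet? arrPseudoCodes (indexOfPseudoCodes - 1)).getD ""
  let arrCurrentPS := (PySem.Str.split? txtCurrentPS " ").getD []
  let score1 : Int := arrCurrentPS.length
  let score2 : Int := if arrCurrentPS.contains "function" then 1 else 0
  let score3 : Int := if arrCurrentPS.contains "nan" then 1 else 0
  let score4 : Int := PySem.Str.len txtCurrentPS
  let score5 : Int := indexOfPseudoCodes
  let score6 : Int := (arrPseudoCodes.length : Int) - indexOfPseudoCodes
  let indexScore7 := pvBack arrPseudoCodes pvPredFor (indexOfPseudoCodes - 1)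
  let score7 : Int := indexOfPseudoCodes - indexScore7
  let indexScore8 := pvBack arrPseudoCodes pvPredRet (indexOfPseudoCodes - 1)
  let score8 : Int := indexScore8
  let score9 : Int := if arrCurrentPS.contains "return" || arrCurrentPS.contains "returns" then 1 else 0
  [score1, score2, score3, score4, score5, score6, score7, score8, score9]

-- ===== PORT B =====
def getListOfFeatures_alt (arrPseudoCodes : List String) (arrLabels : List String) (indexOfPseudoCodes : Int) : List Int :=
  let txtCurrentPS := (PySem.List.pyGet? arrPseudoCodes (indexOfPseudoCodes - 1)).getD ""
  let arrCurrentPS := (PySem.Str.split? txtCurrentPS " ").getD []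
  let lasts :=
    (PySem.List.pyRange 0 (indexOfPseudoCodes - 1) 1).foldl
      (fun (st : Int × Int) p =>
        let s := PySem.Str.lower (PySem.Str.strip ((PySem.List.pyGet? arrPseudoCodes p).getD ""))
        (if PySem.Str.startswith s "for" || PySem.Str.startswith s "iterate" then p else st.1,
         if PySem.Str.startswith s "return" then p else st.2))
      (-1, -1)
  [(arrCurrentPS.length : Int),
   if arrCurrentPS.contains "function" then 1 else 0,
   if arrCurrentPS.contains "nan" then 1 else 0,
   PySem.Str.len txtCurrentPS,
   indexOfPseudoCodes,
   (arrPseudoCodes.length : Int) - indexOfPseudoCodes,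
   indexOfPseudoCodes - (lasts.1 + 1),
   lasts.2 + 1,
   if arrCurrentPS.contains "return" || arrCurrentPS.contains "returns" then 1 else 0]

-- ===== PRECONDITION & SPEC =====
-- Pre_ restricts indexOfPseudoCodes to the natural 1-based line-index range 1..len(arrPseudoCodes):
-- above it A raises IndexError; at indexOfPseudoCodes <= 0 A returns accidental values (Python
-- negative-index wraparound plus leftover state of while-loops that never run), a quirk B does not mimic.
def Pre_getListOfFeatures (arrPseudoCodes : List String) (arrLabels : List String) (indexOfPseudoCodes : Int) : Prop :=
  1 ≤ indexOfPseudoCodes ∧ indexOfPseudoCodes ≤ (arrPseudoCodes.length : Int)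
instance (arrPseudoCodes : List String) (arrLabels : List String) (indexOfPseudoCodes : Int) : Decidable (Pre_getListOfFeatures arrPseudoCodes arrLabels indexOfPseudoCodes) := by unfold Pre_getListOfFeatures; infer_instance
def pvWitness_getListOfFeatures : List String × List String × Int := (["for i in n", "return x"], ["1"], 2)

def Spec_getListOfFeatures (arrPseudoCodes : List String) (arrLabels : List String) (indexOfPseudoCodes : Int) (out : List Int) : Prop := out = getListOfFeatures_alt arrPseudoCodes arrLabels indexOfPseudoCodes
instance (arrPseudoCodes : List String) (arrLabels : List String) (indexOfPseudoCodes : Int) (out : List Int) : Decidable (Spec_getListOfFeatures arrPseudoCodes arrLabels indexOfPseudoCodes out) := by unfold Spec_getListOfFeatures; infer_instance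

-- ===== CLAIM (what is proved, stated in full; the proofs are below) =====
def Claim_equal_getListOfFeatures : Prop := ∀ (arrPseudoCodes : List String) (arrLabels : List String) (indexOfPseudoCodes : Int), Dom_getListOfFeatures arrPseudoCodes arrLabels indexOfPseudoCodes → Pre_getListOfFeatures arrPseudoCodes arrLabels indexOfPseudoCodes → Spec_getListOfFeatures arrPseudoCodes arrLabels indexOfPseudoCodes (getListOfFeatures arrPseudoCodes arrLabels indexOfPseudoCodes)

-- ===== LEMMAS AND PROOFS =====

-- B's paired last-match fold splits into two independent folds
lemma pvFoldl_pair (l : List Int) (c1 c2 : Int → Bool) (a b : Int) :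
    l.foldl (fun (st : Int × Int) p => (if c1 p then p else st.1, if c2 p then p else st.2)) (a, b) =
      (l.foldl (fun a p => if c1 p then p else a) a, l.foldl (fun a p => if c2 p then p else a) b) := by
  induction l generalizing a b with
  | nil => rfl
  | cons x xs ih => simp only [List.foldl_cons]; rw [ih]

-- A's backward break-loop equals B's forward last-match fold (+1), for a natural bound
lemma pvBack_eq_fold (arr : List String) (pred : String → Bool) (n : Nat) :
    pvBack arr pred (n : Int) =
      (PySem.List.pyRange 0 (n : Int) 1).foldl
        (fun a p => if pred ((PySem.List.pyGet? arr p).getD "") then p else a) (-1) + 1 := by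
  have key : ∀ n : Nat, pvBackFuel arr pred n (n : Int) =
      (PySem.List.pyRange 0 (n : Int) 1).foldl
        (fun a p => if pred ((PySem.List.pyGet? arr p).getD "") then p else a) (-1) + 1 := by
    intro n
    induction n with
    | zero => simp [pvBackFuel]
    | succ n ih =>
        have hcast : ((n + 1 : Nat) : Int) = (n : Int) + 1 := by push_cast; ring
        rw [hcast, PySem.List.pyRange_one_succ_right (by positivity), List.foldl_append]
        show (if ((n : Int) + 1) > 0 then _ else _) = _
        rw [if_pos (by positivity), add_sub_cancel_right]
        by_cases hp : pred ((PySem.List.pyGet? arr (n : Int)).getD "")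
        · rw [if_pos hp, List.foldl_cons, List.foldl_nil, if_pos hp]
        · rw [if_neg hp, List.foldl_cons, List.foldl_nil, if_neg hp, ih]
  rw [pvBack, Int.toNat_natCast]
  exact key n

-- ===== VERDICT (by name: the statement is the Claim_ definition above) =====
theorem getListOfFeatures_spec : Claim_equal_getListOfFeatures := by
  intro arr labels idx _ hpre
  obtain ⟨hpos, _⟩ := hpre
  have hn : ((idx - 1).toNat : Int) = idx - 1 := by omega
  unfold Spec_getListOfFeatures
  simp only [getListOfFeatures, getListOfFeatures_alt]
  rw [← hn, pvFoldl_pair, pvBack_eq_fold, pvBack_eq_fold]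
  simp [pvPredFor, pvPredRet]
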